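-- pv_equiv track=rewrite | github.com/bruderjakob17/edu-presburger | presburger_converter/viz/dot.py | compute_depth_and_breadth
-- ===== SOURCE A (Python) =====
-- from collections import defaultdict
-- from collections import deque
--
-- def compute_depth_and_breadth(graph, roots):
--     max_depth = 0
--     max_breadth = 0
--
--     visited = set()
--     queue = deque()
--
--     for root in roots:
--         queue.append((root, 0))  # (node, depth)
--
--     level_count = defaultdict(int)
--
--     while queue:
--         node, depth = queue.popleft()
--         if node in visited:
--             continue
--         visited.add(node)
--
--         max_depth = max(max_depth, depth)
--         level_count[depth] += 1
--         max_breadth = max(max_breadth, level_count[depth])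
--
--         for neighbor in graph.get(node, []):
--             queue.append((neighbor, depth + 1))
--
--     return max_depth, max_breadth
-- ===== SOURCE B (Python) =====
-- def compute_depth_and_breadth(graph, roots):
--     max_depth = 0
--     max_breadth = 0
--     visited = set()
--     frontier = list(roots)
--     depth = 0
--     while frontier:
--         next_frontier = []
--         count = 0
--         for node in frontier:
--             if node not in visited:
--                 visited.add(node)
--                 count += 1
--                 next_frontier.extend(graph.get(node, []))
--         if count > 0:
--             max_depth = max(max_depth, depth)
--             max_breadth = max(max_breadth, count)
--         frontier = next_frontier
--         depth += 1
--     return max_depth, max_breadth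
-- ===== Notes on version B (the rewrite author's own statement) =====
-- stated objective: alternative
-- what changed: Replaces A's single deque of (node, depth) pairs with per-depth counts in a defaultdict by a level-synchronous BFS that keeps one frontier list per level and a single per-level counter, so no depth tags or per-level dictionary are maintained.
import Mathlib
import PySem

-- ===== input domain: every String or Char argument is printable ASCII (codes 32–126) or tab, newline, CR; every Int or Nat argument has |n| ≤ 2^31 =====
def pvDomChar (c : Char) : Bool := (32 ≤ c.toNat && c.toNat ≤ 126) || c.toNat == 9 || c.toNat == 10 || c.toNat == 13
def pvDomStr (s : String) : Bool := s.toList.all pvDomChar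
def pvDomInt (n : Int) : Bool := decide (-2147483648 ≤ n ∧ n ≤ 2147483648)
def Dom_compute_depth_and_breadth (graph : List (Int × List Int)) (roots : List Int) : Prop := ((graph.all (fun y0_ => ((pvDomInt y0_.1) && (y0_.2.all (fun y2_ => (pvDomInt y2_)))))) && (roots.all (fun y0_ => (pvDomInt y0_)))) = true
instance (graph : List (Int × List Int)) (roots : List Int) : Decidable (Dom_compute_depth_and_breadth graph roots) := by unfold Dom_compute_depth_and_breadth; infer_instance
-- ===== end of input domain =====

-- B replaces A's single deque of (node, depth) pairs by a level-synchronous BFS (frontier list per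
-- level, one counter per level); objective: alternative decomposition, same asymptotic cost.

-- ===== PORT A =====
-- graph.get(node, []) — the dict lookup (first match)
def pvGraphGet (graph : List (Int × List Int)) (node : Int) : List Int :=
  (PySem.Dict.mk graph).getD node []

-- total number of adjacency-list entries, used only as a fuel bound: the Python while-loop pops
-- at most len(roots) + sum(len(ns)) entries in total, so this fuel is never exhausted.
def pvSumAll (graph : List (Int × List Int)) : Nat :=
  (graph.map (fun p => p.2.length)).sum

-- the 'while queue:' loop of A; fuel is a guard that only makes the recursion total
def aLoop (graph : List (Int × List Int)) :
    Nat → List (Int × Int) → PySem.Set Int → PySem.Dict Int Int → Int → Int → Int × Int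
  | 0, _, _, _, maxd, maxb => (maxd, maxb)
  | _ + 1, [], _, _, maxd, maxb => (maxd, maxb)
  | f + 1, (node, depth) :: rest, visited, level_count, maxd, maxb =>
    if visited.contains node then
      aLoop graph f rest visited level_count maxd maxb
    else
      let visited' := visited.add node
      let maxd' := max maxd depth
      let c := level_count.getD depth 0 + 1
      let level_count' := level_count.insert depth c
      let maxb' := max maxb c
      aLoop graph f (rest ++ (pvGraphGet graph node).map (fun nb => (nb, depth + 1)))
        visited' level_count' maxd' maxb'

def compute_depth_and_breadth (graph : List (Int × List Int)) (roots : List Int) : Int × Int :=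
  aLoop graph (roots.length + pvSumAll graph) (roots.map (fun r => (r, 0)))
    PySem.Set.empty PySem.Dict.empty 0 0

-- ===== PORT B =====
-- the inner 'for node in frontier:' loop: state (visited, count, next_frontier)
def bInner (graph : List (Int × List Int)) :
    List Int → PySem.Set Int → Int → List Int → PySem.Set Int × Int × List Int
  | [], visited, count, nxt => (visited, count, nxt)
  | node :: rest, visited, count, nxt =>
    if visited.contains node then bInner graph rest visited count nxt
    else bInner graph rest (visited.add node) (count + 1) (nxt ++ pvGraphGet graph node)

-- the outer 'while frontier:' loop, one step per BFS level; fuel is a guard that only makes the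
-- recursion total (levels never exceed the number of visits + 2)
def bOuter (graph : List (Int × List Int)) :
    Nat → List Int → PySem.Set Int → Int → Int → Int → Int × Int
  | 0, _, _, _, maxd, maxb => (maxd, maxb)
  | f + 1, frontier, visited, depth, maxd, maxb =>
    if frontier = [] then (maxd, maxb)
    else
      match bInner graph frontier visited 0 [] with
      | (visited', count, nxt) =>
        let maxd' := if count > 0 then max maxd depth else maxd
        let maxb' := if count > 0 then max maxb count else maxb
        bOuter graph f nxt visited' (depth + 1) maxd' maxb'

def compute_depth_and_breadth_alt (graph : List (Int × List Int)) (roots : List Int) : Int × Int :=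
  bOuter graph (roots.length + pvSumAll graph + 2) roots PySem.Set.empty 0 0 0

-- ===== PRECONDITION & SPEC =====
def Spec_compute_depth_and_breadth (graph : List (Int × List Int)) (roots : List Int) (out : Int × Int) : Prop := out = compute_depth_and_breadth_alt graph roots
instance (graph : List (Int × List Int)) (roots : List Int) (out : Int × Int) : Decidable (Spec_compute_depth_and_breadth graph roots out) := by unfold Spec_compute_depth_and_breadth; infer_instance

-- ===== CLAIM (what is proved, stated in full; the proofs are below) =====
def Claim_equal_compute_depth_and_breadth : Prop := ∀ (graph : List (Int × List Int)) (roots : List Int), Dom_compute_depth_and_breadth graph roots → Spec_compute_depth_and_breadth graph roots (compute_depth_and_breadth graph roots)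

-- ===== LEMMAS AND PROOFS =====

-- sum of adjacency-list lengths over the not-yet-visited keys: an upper bound on the queue
-- entries A can still push
def pvUnvisSum : List (Int × List Int) → PySem.Set Int → Nat
  | [], _ => 0
  | (k, ns) :: rest, vis =>
    (if vis.contains k then 0 else ns.length) + pvUnvisSum rest vis

lemma set_contains_add (s : PySem.Set Int) (x y : Int) :
    PySem.Set.contains (PySem.Set.add s x) y = (PySem.Set.contains s y || y == x) := by
  by_cases h : PySem.Set.contains s x <;>
    cases hyx : y == x <;>
    simp_all [PySem.Set.add, PySem.Set.contains]

lemma pvUnvisSum_add_mono (graph : List (Int × List Int)) (vis : PySem.Set Int) (n : Int) :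
    pvUnvisSum graph (vis.add n) ≤ pvUnvisSum graph vis := by
  induction graph with
  | nil => simp [pvUnvisSum]
  | cons p rest ih =>
    obtain ⟨k, ns⟩ := p
    simp only [pvUnvisSum, set_contains_add]
    have h1 : (if (PySem.Set.contains vis k || k == n) = true then 0 else ns.length)
        ≤ (if PySem.Set.contains vis k = true then 0 else ns.length) := by
      cases PySem.Set.contains vis k
      · simp only [Bool.false_or, Bool.false_eq_true, if_false]
        split <;> omega
      · simp
    omega

lemma pvUnvisSum_add_le (graph : List (Int × List Int)) (vis : PySem.Set Int) (n : Int)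
    (hv : vis.contains n = false) :
    pvUnvisSum graph (vis.add n) + (pvGraphGet graph n).length ≤ pvUnvisSum graph vis := by
  induction graph with
  | nil => simp [pvUnvisSum, pvGraphGet, PySem.Dict.getD, PySem.Dict.get?]
  | cons p rest ih =>
    obtain ⟨k, ns⟩ := p
    have hget : pvGraphGet ((k, ns) :: rest) n =
        if k == n then ns else pvGraphGet rest n := by
      simp only [pvGraphGet, PySem.Dict.getD, PySem.Dict.get?_mk_cons]
      split <;> rfl
    cases hk : k == n with
    | true =>
      have hkn : k = n := eq_of_beq hk
      subst hkn
      simp only [pvUnvisSum, hget, hk, if_true, set_contains_add, hv, Bool.false_or,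
        Bool.false_eq_true, if_false]
      have := pvUnvisSum_add_mono rest vis k
      omega
    | false =>
      simp only [pvUnvisSum, hget, hk, set_contains_add, Bool.or_false,
        Bool.false_eq_true, if_false]
      have := ih
      by_cases h : PySem.Set.contains vis k = true <;>
        · simp only [h, if_true, Bool.false_eq_true, if_false]
          omega

lemma pvUnvisSum_empty (graph : List (Int × List Int)) :
    pvUnvisSum graph ([] : PySem.Set Int) = pvSumAll graph := by
  induction graph with
  | nil => rfl
  | cons p rest ih =>
    obtain ⟨k, ns⟩ := p
    simp only [pvUnvisSum, pvSumAll, List.map_cons, List.sum_cons, PySem.Set.contains,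
      List.contains_nil, Bool.false_eq_true, if_false] at *
    omega

lemma aLoop_nil (graph : List (Int × List Int)) (fa : Nat) (vis : PySem.Set Int)
    (lc : PySem.Dict Int Int) (maxd maxb : Int) :
    aLoop graph fa [] vis lc maxd maxb = (maxd, maxb) := by
  cases fa <;> rfl

lemma bOuter_nil (graph : List (Int × List Int)) (fb : Nat) (vis : PySem.Set Int)
    (d maxd maxb : Int) :
    bOuter graph fb [] vis d maxd maxb = (maxd, maxb) := by
  cases fb <;> simp [bOuter]

lemma bInner_cnt_nonneg (graph : List (Int × List Int)) :
    ∀ (cur : List Int) (vis : PySem.Set Int) (cnt : Int) (nxt : List Int),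
    0 ≤ cnt → 0 ≤ (bInner graph cur vis cnt nxt).2.1 := by
  intro cur
  induction cur with
  | nil => intro vis cnt nxt h; simpa [bInner] using h
  | cons n rest ih =>
    intro vis cnt nxt h
    simp only [bInner]
    split
    · exact ih vis cnt nxt h
    · exact ih (vis.add n) (cnt + 1) (nxt ++ pvGraphGet graph n) (by omega)

-- The central invariant: A's queue always consists of the remaining current-level nodes (depth d)
-- followed by the accumulated next-level nodes (depth d+1); from such a state A computes exactly
-- what B computes by finishing the inner loop and continuing level by level.
lemma bridge (graph : List (Int × List Int)) :
    ∀ (fb : Nat) (cur : List Int) (fa : Nat) (nxt : List Int) (vis : PySem.Set Int)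
      (lc : PySem.Dict Int Int) (cnt maxd maxb d : Int),
    cur.length + nxt.length + pvUnvisSum graph vis ≤ fa →
    cnt.toNat + 1 + (cur.length + nxt.length + pvUnvisSum graph vis) ≤ fb →
    0 ≤ cnt →
    (cnt = 0 → nxt = []) →
    lc.getD d 0 = cnt →
    (∀ k : Int, d < k → lc.getD k 0 = 0) →
    aLoop graph fa (cur.map (fun n => (n, d)) ++ nxt.map (fun n => (n, d + 1))) vis lc
        (if cnt = 0 then maxd else max maxd d) (if cnt = 0 then maxb else max maxb cnt)
      = (match bInner graph cur vis cnt nxt with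
         | (vis', cnt', nxt') =>
           bOuter graph fb nxt' vis' (d + 1)
             (if cnt' = 0 then maxd else max maxd d)
             (if cnt' = 0 then maxb else max maxb cnt')) := by
  intro fb
  induction fb with
  | zero =>
    intro cur fa nxt vis lc cnt maxd maxb d _ h2 hc _ _ _
    omega
  | succ fb ihfb =>
    intro cur
    induction cur with
    | nil =>
      intro fa nxt vis lc cnt maxd maxb d h1 h2 hc hnil hlcd hlck
      simp only [List.map_nil, List.nil_append, bInner]
      by_cases hcz : cnt = 0
      · have hnx := hnil hcz
        subst hnx
        simp only [List.map_nil, aLoop_nil, bOuter_nil]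
        rfl
      · by_cases hnx : nxt = []
        · subst hnx
          simp only [List.map_nil, aLoop_nil, bOuter_nil]
          rfl
        · -- a new nonempty level starts: consume one unit of B's fuel
          simp only [hcz, if_false]
          rw [show bOuter graph (fb + 1) nxt vis (d + 1) (max maxd d) (max maxb cnt)
              = (match bInner graph nxt vis 0 [] with
                 | (vis', count, nxt') =>
                   bOuter graph fb nxt' vis' (d + 1 + 1)
                     (if count > 0 then max (max maxd d) (d + 1) else max maxd d)
                     (if count > 0 then max (max maxb cnt) count else max maxb cnt))
              from by simp [bOuter, hnx]]
          have hstep := ihfb nxt fa [] vis lc 0 (max maxd d) (max maxb cnt) (d + 1)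
            (by simpa using h1) (by simp only [List.length_nil]; omega) le_rfl
            (fun _ => rfl) (hlck (d + 1) (by omega)) (fun k hk => hlck k (by omega))
          simp only [if_true, List.map_nil, List.append_nil] at hstep
          rw [hstep]
          rcases hbi : bInner graph nxt vis 0 [] with ⟨v', c', nx'⟩
          have hc' : 0 ≤ c' := by
            have := bInner_cnt_nonneg graph nxt vis 0 [] le_rfl
            rw [hbi] at this; exact this
          by_cases hc'z : c' = 0
          · simp [hc'z]
          · simp only [hc'z, if_false, show c' > 0 from by omega, if_true]
    | cons n rest ihc =>
      intro fa nxt vis lc cnt maxd maxb d h1 h2 hc hnil hlcd hlck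
      cases fa with
      | zero => simp only [List.length_cons] at h1; omega
      | succ fa =>
        simp only [List.map_cons, List.cons_append]
        cases hv : PySem.Set.contains vis n with
        | true =>
          have hm : n ∈ vis := by simpa [PySem.Set.contains] using hv
          rw [show aLoop graph (fa + 1) ((n, d) :: (rest.map (fun n => (n, d)) ++ nxt.map (fun n => (n, d + 1)))) vis lc
                (if cnt = 0 then maxd else max maxd d) (if cnt = 0 then maxb else max maxb cnt)
              = aLoop graph fa (rest.map (fun n => (n, d)) ++ nxt.map (fun n => (n, d + 1))) vis lc
                (if cnt = 0 then maxd else max maxd d) (if cnt = 0 then maxb else max maxb cnt)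
              from by simp [aLoop, hm]]
          rw [show bInner graph (n :: rest) vis cnt nxt = bInner graph rest vis cnt nxt
              from by simp [bInner, hm]]
          exact ihc fa nxt vis lc cnt maxd maxb d
            (by simp only [List.length_cons] at h1; omega)
            (by simp only [List.length_cons] at h2; omega) hc hnil hlcd hlck
        | false =>
          have hm : n ∉ vis := by simpa [PySem.Set.contains] using hv
          have hle := pvUnvisSum_add_le graph vis n hv
          have hmd : max (if cnt = 0 then maxd else max maxd d) d = max maxd d := by
            by_cases hcz : cnt = 0 <;> simp only [hcz, if_true, if_false] <;> omega
          have hmb : max (if cnt = 0 then maxb else max maxb cnt) (cnt + 1)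
              = max maxb (cnt + 1) := by
            by_cases hcz : cnt = 0 <;> simp only [hcz, if_true, if_false] <;> omega
          rw [show aLoop graph (fa + 1) ((n, d) :: (rest.map (fun n => (n, d)) ++ nxt.map (fun n => (n, d + 1)))) vis lc
                (if cnt = 0 then maxd else max maxd d) (if cnt = 0 then maxb else max maxb cnt)
              = aLoop graph fa
                  ((rest.map (fun n => (n, d)) ++ nxt.map (fun n => (n, d + 1)))
                    ++ (pvGraphGet graph n).map (fun nb => (nb, d + 1)))
                  (vis.add n) (lc.insert d (lc.getD d 0 + 1))
                  (max (if cnt = 0 then maxd else max maxd d) d)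
                  (max (if cnt = 0 then maxb else max maxb cnt) (lc.getD d 0 + 1))
              from by simp [aLoop, hm]]
          rw [show bInner graph (n :: rest) vis cnt nxt
              = bInner graph rest (vis.add n) (cnt + 1) (nxt ++ pvGraphGet graph n)
              from by simp [bInner, hm]]
          rw [hlcd, hmd, hmb, List.append_assoc, ← List.map_append]
          have hres := ihc fa (nxt ++ pvGraphGet graph n) (vis.add n)
            (lc.insert d (cnt + 1)) (cnt + 1) maxd maxb d
            (by simp only [List.length_cons, List.length_append] at h1 ⊢; omega)
            (by simp only [List.length_cons, List.length_append] at h2 ⊢; omega)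
            (by omega) (fun h => absurd h (by omega))
            (by rw [PySem.Dict.getD_insert_self])
            (fun k hk => by rw [PySem.Dict.getD_insert_of_ne _ _ _ (by omega)]; exact hlck k hk)
          simp only [show cnt + 1 ≠ 0 from by omega, if_false] at hres
          exact hres

-- ===== VERDICT (by name: the statement is the Claim_ definition above) =====
theorem compute_depth_and_breadth_spec : Claim_equal_compute_depth_and_breadth := by
  intro graph roots _
  unfold Spec_compute_depth_and_breadth compute_depth_and_breadth compute_depth_and_breadth_alt
  cases roots with
  | nil => simp [aLoop_nil, bOuter_nil]
  | cons r rs =>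
    have hfu : (r :: rs).length + pvSumAll graph + 2
        = ((r :: rs).length + pvSumAll graph + 1) + 1 := rfl
    rw [hfu, show bOuter graph (((r :: rs).length + pvSumAll graph + 1) + 1) (r :: rs)
          PySem.Set.empty 0 0 0
        = (match bInner graph (r :: rs) PySem.Set.empty 0 [] with
           | (vis', count, nxt') =>
             bOuter graph ((r :: rs).length + pvSumAll graph + 1) nxt' vis' (0 + 1)
               (if count > 0 then max 0 0 else 0)
               (if count > 0 then max 0 count else 0))
        from by simp [bOuter]]
    have hstep := bridge graph ((r :: rs).length + pvSumAll graph + 1) (r :: rs)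
      ((r :: rs).length + pvSumAll graph) [] PySem.Set.empty PySem.Dict.empty 0 0 0 0
      (by simp [PySem.Set.empty, pvUnvisSum_empty])
      (by simp only [List.length_nil, Int.toNat_zero, PySem.Set.empty, pvUnvisSum_empty]; omega)
      le_rfl (fun _ => rfl) (by simp [PySem.Dict.getD_empty])
      (fun k _ => by simp [PySem.Dict.getD_empty])
    simp only [if_true, List.map_nil, List.append_nil] at hstep
    rw [hstep]
    rcases hbi : bInner graph (r :: rs) PySem.Set.empty 0 [] with ⟨v', c', nx'⟩
    have hc' : 0 ≤ c' := by
      have := bInner_cnt_nonneg graph (r :: rs) PySem.Set.empty 0 [] le_rfl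
      rw [hbi] at this; exact this
    by_cases hc'z : c' = 0
    · simp [hc'z]
    · simp only [hc'z, if_false, show c' > 0 from by omega, if_true]
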